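-- pv_equiv track=rewrite | github.com/agnesgertz/- | TASK1.py | camel
-- ===== SOURCE A (Python) =====
-- def camel(st):
--     st = st.lower()
--     st = list(st)
--     lst_i = []
--     lst_l = []
--     for i in range(len(st)):
--         if st[i] == "," or st[i] == "." or st[i] == "!" or st[i] == " " or st[i] == ":" or st[i] == "-":
--             lst_i.append(i)
--             lst_l.append(st[i])
--             st[i] = "#"
--     st = "".join(st).replace("#","")
--     st = list(st)
--     for i in range(len(st)):
--         if i % 2 == 0:
--             st[i] = st[i].upper()
--     st = "".join(st)
--     for i in range(len(lst_i)):
--         st = st[:lst_i[i]] + lst_l[i] + st[lst_i[i]:]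
--     return st
-- ===== SOURCE B (Python) =====
-- def camel(st):
--     st = st.lower()
--     out = []
--     j = 0
--     for ch in st:
--         if ch in ",.! :-":
--             out.append(ch)
--         else:
--             out.append(ch.upper() if j % 2 == 0 else ch)
--             j += 1
--     return "".join(out)
-- ===== Notes on version B (the rewrite author's own statement) =====
-- stated objective: faster
-- what changed: B replaces A's three passes plus one string-slicing re-insertion per separator (quadratic) with a single pass that keeps separators in place and alternates the case of the other characters by tracking their running count.
-- intended difference: On inputs containing '#', A's sentinel trick silently deletes the input's own '#' characters from the result; B keeps them and alternates their case like any other character, which is the intended behaviour since '#' is not a separator. — e.g. on camel("a#b"): A returns "Ab", B returns "A#B"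
import Mathlib
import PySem

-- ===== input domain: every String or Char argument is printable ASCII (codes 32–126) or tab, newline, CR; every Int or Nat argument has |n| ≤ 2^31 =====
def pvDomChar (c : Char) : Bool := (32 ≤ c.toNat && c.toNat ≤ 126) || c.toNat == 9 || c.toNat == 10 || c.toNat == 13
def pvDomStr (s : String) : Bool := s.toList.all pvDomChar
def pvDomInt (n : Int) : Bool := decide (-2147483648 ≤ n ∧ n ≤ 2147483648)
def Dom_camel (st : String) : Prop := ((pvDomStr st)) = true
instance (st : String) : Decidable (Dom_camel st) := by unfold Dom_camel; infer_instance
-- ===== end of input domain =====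

-- B alternates case in ONE pass keeping separators in place (A: three passes plus one
-- string-slicing re-insertion per separator); on inputs containing '#' A's sentinel
-- deletes the input's own '#' chars while B keeps them (see D_camel below).

-- ===== PORT A =====
-- the separator test of A's first loop, in A's branch order
def camelSep (c : Char) : Bool :=
  c = ',' || c = '.' || c = '!' || c = ' ' || c = ':' || c = '-'

-- A's first loop: walks st left to right by index i; a separator char is appended to
-- lst_i / lst_l and overwritten by '#' in place. Ported as structural recursion carrying
-- the current index i; the three lists come out in the same (append) order.
def camelLoop1 : List Char → Nat → (List Nat × List Char × List Char)
  | [], _ => ([], [], [])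
  | c :: r, i =>
    let (is, ls, out) := camelLoop1 r (i + 1)
    if camelSep c then (i :: is, c :: ls, '#' :: out) else (is, ls, c :: out)

-- A's second loop: uppercase the chars at even indices (index carried explicitly)
def camelLoop2 : List Char → Nat → List Char
  | [], _ => []
  | c :: r, i =>
    (if i % 2 = 0 then PySem.Chars.upperChar c else c) :: camelLoop2 r (i + 1)

-- A's third loop: st = st[:k] + l + st[k:] for each recorded (k, l) in order; the
-- recorded k are the nonnegative loop indices of loop 1, so the slices st[:k] / st[k:]
-- are exactly take k / drop k (Python slices clamp past the end exactly as take/drop do)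
def camelIns (ps : List (Nat × Char)) (s : List Char) : List Char :=
  ps.foldl (fun s p => s.take p.1 ++ [p.2] ++ s.drop p.1) s

def camel (st : String) : String :=
  let l := PySem.Chars.lower st.toList
  let r := camelLoop1 l 0
  -- "".join(st).replace("#", ""): removing every '#' char = filter (exact: the pattern
  -- is a single char and the replacement is empty)
  let l2 := r.2.2.filter (· ≠ '#')
  let l3 := camelLoop2 l2 0
  String.ofList (camelIns (r.1.zip r.2.1) l3)

-- ===== PORT B =====
-- B's single pass: a separator is emitted unchanged; any other char is uppercased when
-- its running non-separator count j is even
def camelAltGo : List Char → Nat → List Char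
  | [], _ => []
  | c :: r, j =>
    if camelSep c then c :: camelAltGo r j
    else (if j % 2 = 0 then PySem.Chars.upperChar c else c) :: camelAltGo r (j + 1)

def camel_alt (st : String) : String :=
  String.ofList (camelAltGo (PySem.Chars.lower st.toList) 0)

-- ===== PRECONDITION & SPEC =====
-- On inputs containing '#', A's sentinel trick silently deletes the input's own '#'
-- characters from the result; B keeps them and alternates their case like any other
-- character, which is the intended behaviour since '#' is not a separator.
def D_camel (st : String) : Prop := '#' ∈ st.toList
instance (st : String) : Decidable (D_camel st) := by unfold D_camel; infer_instance

def Spec_camel (st : String) (out : String) : Prop := ¬ D_camel st → out = camel_alt st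
instance (st : String) (out : String) : Decidable (Spec_camel st out) := by unfold Spec_camel; infer_instance

def pvDiffWitness_camel : String := "a#b"
def pvDiffWitnessOut_camel : String × String := ("Ab", "A#B")

-- ===== CLAIM (what is proved, stated in full; the proofs are below) =====
def Claim_unchanged_camel : Prop := ∀ (st : String), Dom_camel st → Spec_camel st (camel st)
def Claim_changed_camel : Prop := Dom_camel (pvDiffWitness_camel) ∧ D_camel (pvDiffWitness_camel) ∧ camel (pvDiffWitness_camel) = pvDiffWitnessOut_camel.1 ∧ camel_alt (pvDiffWitness_camel) = pvDiffWitnessOut_camel.2 ∧ pvDiffWitnessOut_camel.1 ≠ pvDiffWitnessOut_camel.2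
def Claim_exact_camel : Prop := ∀ (st : String), Dom_camel st → D_camel st → camel st ≠ camel_alt st

-- ===== LEMMAS AND PROOFS =====
-- lowercasing never creates a '#'
theorem lowerChar_eq_hash {c : Char} (h : PySem.Chars.lowerChar c = '#') : c = '#' := by
  unfold PySem.Chars.lowerChar at h
  split at h
  · rename_i hu
    simp only [PySem.Chars.isupper, Bool.and_eq_true, decide_eq_true_eq] at hu
    have h1 : 65 ≤ c.toNat := hu.1
    have h2 : c.toNat ≤ 90 := hu.2
    have ht := congrArg Char.toNat h
    rw [Char.toNat_ofNat, if_pos (Or.inl (by omega))] at ht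
    have h35 : ('#'.toNat) = 35 := rfl
    omega
  · exact h

-- indices recorded by loop 1 starting at i + 1 are those starting at i, shifted by one
theorem camelLoop1_shift (l : List Char) (i : Nat) :
    camelLoop1 l (i + 1) = ((camelLoop1 l i).1.map (· + 1), (camelLoop1 l i).2) := by
  induction l generalizing i with
  | nil => simp [camelLoop1]
  | cons c r ih =>
    simp only [camelLoop1, ih (i + 1)]
    by_cases h : camelSep c <;> simp [h]

-- inserting at all-shifted indices into x :: s inserts past the head
theorem camelIns_shift (ps : List (Nat × Char)) (x : Char) (s : List Char) :
    camelIns (ps.map (fun p => (p.1 + 1, p.2))) (x :: s) = x :: camelIns ps s := by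
  induction ps generalizing s with
  | nil => simp [camelIns]
  | cons p t ih => simp [camelIns, List.foldl_cons] at ih ⊢; exact ih _

theorem zip_map_add_one (is : List Nat) (ls : List Char) :
    (is.map (· + 1)).zip ls = (is.zip ls).map (fun p => (p.1 + 1, p.2)) := by
  rw [List.zip_map_left]; rfl

-- key invariant: on a '#'-free list, A's pipeline (record-and-blank, strip '#',
-- alternate, re-insert) equals B's single pass, for any running parity index j
theorem camel_pipeline (l : List Char) (hl : '#' ∉ l) (j : Nat) :
    camelIns ((camelLoop1 l 0).1.zip (camelLoop1 l 0).2.1)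
      (camelLoop2 (((camelLoop1 l 0).2.2).filter (· ≠ '#')) j) = camelAltGo l j := by
  induction l generalizing j with
  | nil => simp [camelLoop1, camelLoop2, camelIns, camelAltGo]
  | cons c r ih =>
    have hc : c ≠ '#' := fun h => hl (h ▸ List.mem_cons_self)
    have hr : '#' ∉ r := fun h => hl (List.mem_cons_of_mem _ h)
    by_cases h : camelSep c
    · have e1 : camelLoop1 (c :: r) 0 =
          (0 :: (camelLoop1 r 0).1.map (· + 1), c :: (camelLoop1 r 0).2.1,
            '#' :: (camelLoop1 r 0).2.2) := by
        simp [camelLoop1, camelLoop1_shift r 0, h]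
      rw [e1]
      rw [List.filter_cons_of_neg (by simp)]
      rw [List.zip_cons_cons, zip_map_add_one]
      have e2 : ∀ ps s, camelIns ((0, c) :: ps) s = camelIns ps (c :: s) := by
        intro ps s; simp [camelIns, List.foldl_cons]
      rw [e2, camelIns_shift, ih hr j]
      simp [camelAltGo, h]
    · have e1 : camelLoop1 (c :: r) 0 =
          ((camelLoop1 r 0).1.map (· + 1), (camelLoop1 r 0).2.1,
            c :: (camelLoop1 r 0).2.2) := by
        simp [camelLoop1, camelLoop1_shift r 0, h]
      rw [e1]
      rw [List.filter_cons_of_pos (by simp [hc])]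
      have e2 : camelLoop2 (c :: ((camelLoop1 r 0).2.2).filter (· ≠ '#')) j =
          (if j % 2 = 0 then PySem.Chars.upperChar c else c) ::
            camelLoop2 (((camelLoop1 r 0).2.2).filter (· ≠ '#')) (j + 1) := rfl
      rw [e2, zip_map_add_one, camelIns_shift, ih hr (j + 1)]
      simp [camelAltGo, h]

-- length bookkeeping for the tightness claim
theorem camelIns_length (ps : List (Nat × Char)) (s : List Char) :
    (camelIns ps s).length = ps.length + s.length := by
  induction ps generalizing s with
  | nil => simp [camelIns]
  | cons p t ih =>
    simp [camelIns, List.foldl_cons] at ih ⊢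
    rw [ih]
    simp
    omega

theorem camelLoop2_length (l : List Char) (j : Nat) :
    (camelLoop2 l j).length = l.length := by
  induction l generalizing j with
  | nil => rfl
  | cons c r ih => simp [camelLoop2, ih]

theorem camelAltGo_length (l : List Char) (j : Nat) :
    (camelAltGo l j).length = l.length := by
  induction l generalizing j with
  | nil => rfl
  | cons c r ih => by_cases h : camelSep c <;> simp [camelAltGo, h, ih]

-- loop 1's three outputs account for every char: |lst_i| = |lst_l| and
-- |lst_i| + |filtered| + (number of '#' in the input) = |input|
theorem camelLoop1_lengths (l : List Char) (i : Nat) :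
    (camelLoop1 l i).1.length = (camelLoop1 l i).2.1.length ∧
    (camelLoop1 l i).1.length + (((camelLoop1 l i).2.2).filter (· ≠ '#')).length
      + l.count '#' = l.length := by
  induction l generalizing i with
  | nil => simp [camelLoop1]
  | cons c r ih =>
    obtain ⟨ih1, ih2⟩ := ih (i + 1)
    by_cases h : camelSep c
    · have hc : c ≠ '#' := by intro hch; subst hch; exact absurd h (by decide)
      have e1 : camelLoop1 (c :: r) i =
          (i :: (camelLoop1 r (i + 1)).1, c :: (camelLoop1 r (i + 1)).2.1,
            '#' :: (camelLoop1 r (i + 1)).2.2) := by simp [camelLoop1, h]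
      rw [e1]
      refine ⟨by simp [ih1], ?_⟩
      rw [List.filter_cons_of_neg (by simp), List.count_cons, if_neg (by simp [hc])]
      simp only [List.length_cons]
      omega
    · have e1 : camelLoop1 (c :: r) i =
          ((camelLoop1 r (i + 1)).1, (camelLoop1 r (i + 1)).2.1,
            c :: (camelLoop1 r (i + 1)).2.2) := by simp [camelLoop1, h]
      rw [e1]
      refine ⟨ih1, ?_⟩
      by_cases hch : c = '#'
      · subst hch
        rw [List.filter_cons_of_neg (by simp), List.count_cons, if_pos (by simp)]
        simp only [List.length_cons]
        omega
      · rw [List.filter_cons_of_pos (by simp [hch]), List.count_cons, if_neg (by simp [hch])]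
        simp only [List.length_cons]
        omega

theorem camel_spec : Claim_unchanged_camel := by
  intro st _ hD
  have hl : '#' ∉ PySem.Chars.lower st.toList := by
    intro hm
    obtain ⟨c, hc, he⟩ := List.mem_map.mp hm
    rw [lowerChar_eq_hash he] at hc
    exact hD hc
  show camel st = camel_alt st
  simp only [camel, camel_alt]
  rw [camel_pipeline _ hl 0]

theorem camel_changed : Claim_changed_camel := by unfold Claim_changed_camel; decide

theorem camel_tight : Claim_exact_camel := by
  intro st _ hD hEq
  have hm : '#' ∈ PySem.Chars.lower st.toList :=
    List.mem_map.mpr ⟨'#', hD, rfl⟩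
  have hcnt : 0 < (PySem.Chars.lower st.toList).count '#' := List.count_pos_iff.mpr hm
  have hlen := congrArg (fun s : String => s.toList.length) hEq
  simp only [camel, camel_alt, String.toList_ofList] at hlen
  rw [camelIns_length, camelLoop2_length, camelAltGo_length, List.length_zip] at hlen
  obtain ⟨h1, h2⟩ := camelLoop1_lengths (PySem.Chars.lower st.toList) 0
  omega
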